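-- pv_equiv track=rewrite | github.com/lorenzoferretti/db4hls | src/synthesis.py | check_bind_condition
-- ===== SOURCE A (Python) =====
-- def check_bind_condition(bind_config_info):
--     bind = {}
--     for b in bind_config_info:
--         if b[0] is not None:
--             if b[0] not in bind.keys():
--                 bind[b[0]] = b[1]
--             else:
--                 if bind[b[0]] != b[1]:
--                     return False
--
--     return True
-- ===== SOURCE B (Python) =====
-- def check_bind_condition(bind_config_info):
--     pairs = [(k, v) for k, v in bind_config_info if k is not None]
--     for i, (k1, v1) in enumerate(pairs):
--         for k2, v2 in pairs[i + 1:]: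
--             if k1 == k2 and v1 != v2:
--                 return False
--     return True
-- ===== Notes on version B (the rewrite author's own statement) =====
-- stated objective: alternative
-- what changed: Replaces A's first-occurrence dict with a dict-free pairwise scan: filter out None keys once, then compare every pair of entries sharing a key directly (consistency with the first occurrence is equivalent to all-pairs agreement).
import Mathlib
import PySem

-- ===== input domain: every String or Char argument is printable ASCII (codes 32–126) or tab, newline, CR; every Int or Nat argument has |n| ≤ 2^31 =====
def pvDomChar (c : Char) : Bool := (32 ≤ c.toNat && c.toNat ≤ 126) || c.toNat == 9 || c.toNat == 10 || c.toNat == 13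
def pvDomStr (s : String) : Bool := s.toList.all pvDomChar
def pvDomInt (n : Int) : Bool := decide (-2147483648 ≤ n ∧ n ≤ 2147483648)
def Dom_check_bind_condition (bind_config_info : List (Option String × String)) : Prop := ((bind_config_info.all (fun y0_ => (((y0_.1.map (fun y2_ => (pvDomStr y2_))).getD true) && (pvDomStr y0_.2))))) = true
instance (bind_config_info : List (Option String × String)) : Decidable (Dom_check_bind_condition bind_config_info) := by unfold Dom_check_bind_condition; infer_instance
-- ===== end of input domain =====

-- B replaces A's first-occurrence dict with a dict-free all-pairs consistency scan (alternative decomposition, same results).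

-- ===== PORT A =====
-- A's loop over bind_config_info with the dict `bind` and the early `return False`.
def pvCheckLoop (bind : PySem.Dict String String) : List (Option String × String) → Bool
  | [] => true
  | b :: rest =>
    match b.1 with
    | none => pvCheckLoop bind rest
    | some k =>
      match bind.get? k with                       -- `b[0] not in bind.keys()` / `bind[b[0]]`
      | none => pvCheckLoop (bind.insert k b.2) rest
      | some w => if w != b.2 then false else pvCheckLoop bind rest

def check_bind_condition (bind_config_info : List (Option String × String)) : Bool :=
  pvCheckLoop PySem.Dict.empty bind_config_info

-- ===== PORT B =====
-- `pairs = [(k, v) for k, v in bind_config_info if k is not None]`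
def pvPairs (bind_config_info : List (Option String × String)) : List (String × String) :=
  bind_config_info.filterMap (fun b => b.1.map (fun k => (k, b.2)))

-- the two nested loops with the early `return False`: head against the rest, then recurse
def pvPairwiseOk : List (String × String) → Bool
  | [] => true
  | p :: rest =>
    (rest.all (fun q => !(p.1 == q.1 && p.2 != q.2))) && pvPairwiseOk rest

def check_bind_condition_alt (bind_config_info : List (Option String × String)) : Bool :=
  pvPairwiseOk (pvPairs bind_config_info)

-- ===== PRECONDITION & SPEC =====
def Spec_check_bind_condition (bind_config_info : List (Option String × String)) (out : Bool) : Prop := out = check_bind_condition_alt bind_config_info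
instance (bind_config_info : List (Option String × String)) (out : Bool) : Decidable (Spec_check_bind_condition bind_config_info out) := by unfold Spec_check_bind_condition; infer_instance

-- ===== CLAIM (what is proved, stated in full; the proofs are below) =====
def Claim_equal_check_bind_condition : Prop := ∀ (bind_config_info : List (Option String × String)), Dom_check_bind_condition bind_config_info → Spec_check_bind_condition bind_config_info (check_bind_condition bind_config_info)

-- ===== LEMMAS AND PROOFS =====

theorem pvPairwiseOk_iff (l : List (String × String)) :
    pvPairwiseOk l = true ↔ l.Pairwise (fun p q => p.1 = q.1 → p.2 = q.2) := by
  induction l with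
  | nil => simp [pvPairwiseOk]
  | cons p rest ih =>
    simp only [pvPairwiseOk, Bool.and_eq_true, List.all_eq_true, List.pairwise_cons, ih]
    constructor
    · rintro ⟨h1, h2⟩
      refine ⟨fun q hq hk => ?_, h2⟩
      have := h1 q hq
      simp only [Bool.not_eq_eq_eq_not, Bool.not_true, Bool.and_eq_false_iff,
        beq_eq_false_iff_ne, bne_eq_false_iff_eq] at this
      rcases this with h | h
      · exact absurd hk h
      · exact h
    · rintro ⟨h1, h2⟩
      refine ⟨fun q hq => ?_, h2⟩
      by_cases hk : p.1 = q.1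
      · simp [hk, h1 q hq hk]
      · simp [hk]

theorem pv_insert_forall (bind : PySem.Dict String String) (k v : String)
    (P : List (String × String)) (hget : bind.get? k = none) :
    (∀ p ∈ P, ∀ w, (bind.insert k v).get? p.1 = some w → w = p.2)
      ↔ ((∀ p ∈ P, ∀ w, bind.get? p.1 = some w → w = p.2) ∧
          (∀ q ∈ P, k = q.1 → v = q.2)) := by
  constructor
  · intro h
    refine ⟨fun p hp w hw => ?_, fun q hq hkq => ?_⟩
    · by_cases hk : p.1 = k
      · rw [hk, hget] at hw; cases hw
      · exact h p hp w (by rw [PySem.Dict.get?_insert, if_neg hk]; exact hw)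
    · exact h q hq v (by rw [PySem.Dict.get?_insert, if_pos hkq.symm])
  · rintro ⟨h1, h2⟩ p hp w hw
    rw [PySem.Dict.get?_insert] at hw
    by_cases hk : p.1 = k
    · rw [if_pos hk] at hw
      injection hw with hv
      subst hv
      exact h2 p hp hk.symm
    · rw [if_neg hk] at hw
      exact h1 p hp w hw

theorem pvCheckLoop_iff (l : List (Option String × String)) :
    ∀ (bind : PySem.Dict String String),
      pvCheckLoop bind l = true ↔
        ((∀ p ∈ pvPairs l, ∀ w, bind.get? p.1 = some w → w = p.2) ∧
          (pvPairs l).Pairwise (fun p q => p.1 = q.1 → p.2 = q.2)) := by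
  induction l with
  | nil => intro bind; simp [pvCheckLoop, pvPairs]
  | cons b rest ih =>
    intro bind
    obtain ⟨k?, v⟩ := b
    cases k? with
    | none => simpa [pvCheckLoop, pvPairs] using ih bind
    | some k =>
      have hpairs : pvPairs ((some k, v) :: rest) = (k, v) :: pvPairs rest := by
        simp [pvPairs]
      simp only [hpairs, List.forall_mem_cons, List.pairwise_cons]
      cases hget : bind.get? k with
      | none =>
        rw [show pvCheckLoop bind ((some k, v) :: rest)
              = pvCheckLoop (bind.insert k v) rest by simp [pvCheckLoop, hget]]
        rw [ih, pv_insert_forall bind k v _ hget]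
        constructor
        · rintro ⟨⟨h1, h2⟩, hpw⟩
          exact ⟨⟨fun w hw => by simp at hw, h1⟩,
            fun q hq hkq => h2 q hq hkq, hpw⟩
        · rintro ⟨⟨_, h1⟩, hhd, hpw⟩
          exact ⟨⟨h1, fun q hq hkq => hhd q hq hkq⟩, hpw⟩
      | some w =>
        rw [show pvCheckLoop bind ((some k, v) :: rest)
              = if w != v then false else pvCheckLoop bind rest by simp [pvCheckLoop, hget]]
        by_cases hwv : w = v
        · subst hwv
          rw [if_neg (by simp)]
          rw [ih]
          constructor
          · rintro ⟨h1, hpw⟩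
            refine ⟨⟨fun w' hw' => by injection hw' with h; exact h.symm, h1⟩,
              ?_, hpw⟩
            intro q hq hkq
            exact h1 q hq w (by rw [← hkq]; exact hget)
          · rintro ⟨⟨_, h1⟩, _, hpw⟩
            exact ⟨h1, hpw⟩
        · rw [if_pos (bne_iff_ne.mpr hwv)]
          constructor
          · intro h; cases h
          · rintro ⟨⟨hhd, _⟩, _⟩
            exact absurd (hhd w rfl) hwv

-- ===== VERDICT (by name: the statement is the Claim_ definition above) =====
theorem check_bind_condition_spec : Claim_equal_check_bind_condition := by
  intro l _
  unfold Spec_check_bind_condition check_bind_condition check_bind_condition_alt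
  rw [Bool.eq_iff_iff, pvCheckLoop_iff, pvPairwiseOk_iff]
  constructor
  · rintro ⟨_, h⟩; exact h
  · intro h; exact ⟨by intro p _ w hw; simp [PySem.Dict.get?_empty] at hw, h⟩
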